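-- pv_equiv track=rewrite | github.com/Swaraj7700/Computer_Networks | linecoding/app.py | pseudoternary
-- ===== SOURCE A (Python) =====
-- def pseudoternary(data):
--     last = -1
--     output = []
--     for bit in data:
--         if bit == 0:
--             last *= -1
--             output.append(last)
--         else:
--             output.append(0)
--     return output
-- ===== SOURCE B (Python) =====
-- def pseudoternary(data):
--     # Stateless closed form: position i is 0 for a 1-bit; a 0-bit gets +1/-1
--     # by the parity of the number of zero bits strictly before it.
--     data = list(data)
--     return [0 if data[i] != 0 else (1 if data[:i].count(0) % 2 == 0 else -1)
--             for i in range(len(data))]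
-- ===== Notes on version B (the rewrite author's own statement) =====
-- stated objective: alternative
-- what changed: Replaced the stateful scan that carries and flips the last pulse with a stateless per-position closed form: each zero bit's pulse is computed directly from the parity of the count of zero bits in the prefix before it (nonzero bits map to 0).
import Mathlib
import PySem

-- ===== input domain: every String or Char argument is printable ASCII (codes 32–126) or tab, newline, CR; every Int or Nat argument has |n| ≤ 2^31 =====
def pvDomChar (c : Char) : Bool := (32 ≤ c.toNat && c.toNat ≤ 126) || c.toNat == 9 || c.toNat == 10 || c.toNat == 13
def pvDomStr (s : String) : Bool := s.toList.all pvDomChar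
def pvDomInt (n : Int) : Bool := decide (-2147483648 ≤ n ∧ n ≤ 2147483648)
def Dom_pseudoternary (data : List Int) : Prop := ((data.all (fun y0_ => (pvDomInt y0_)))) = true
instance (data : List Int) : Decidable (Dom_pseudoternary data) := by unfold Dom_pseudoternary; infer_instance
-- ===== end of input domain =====

-- ===== PORT A =====
-- B replaces A's stateful sign-flipping scan with a stateless per-position closed form
-- (prefix zero-count parity); objective: alternative.
def pseudoternary (data : List Int) : List Int :=
  (data.foldl (fun (s : Int × List Int) bit =>
    if bit == 0 then (s.1 * -1, s.2 ++ [s.1 * -1]) else (s.1, s.2 ++ [0])) (-1, [])).2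

-- ===== PORT B =====
-- data[i] for i in range(len(data)) is in range, so it is data.getD i 0 (exact here);
-- data[:i] with 0 ≤ i is data.take i (exact here); list.count(0) is List.count 0.
def pseudoternary_alt (data : List Int) : List Int :=
  (List.range data.length).map (fun i =>
    if data.getD i 0 ≠ 0 then 0
    else if (data.take i).count 0 % 2 = 0 then (1 : Int) else -1)

-- ===== PRECONDITION & SPEC =====
def Spec_pseudoternary (data : List Int) (out : List Int) : Prop := out = pseudoternary_alt data
instance (data : List Int) (out : List Int) : Decidable (Spec_pseudoternary data out) := by unfold Spec_pseudoternary; infer_instance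

-- ===== CLAIM (what is proved, stated in full; the proofs are below) =====
def Claim_equal_pseudoternary : Prop := ∀ (data : List Int), Dom_pseudoternary data → Spec_pseudoternary data (pseudoternary data)

-- ===== LEMMAS AND PROOFS =====

-- A's loop with the accumulator peeled off, as a structural recursion.
def ptScan : Int → List Int → List Int
  | _, [] => []
  | s, bit :: rest => if bit = 0 then (s * -1) :: ptScan (s * -1) rest
                      else 0 :: ptScan s rest

theorem ptScan_foldl (data : List Int) (s : Int) (acc : List Int) :
    (data.foldl (fun (s : Int × List Int) bit =>
      if bit == 0 then (s.1 * -1, s.2 ++ [s.1 * -1]) else (s.1, s.2 ++ [0])) (s, acc)).2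
    = acc ++ ptScan s data := by
  induction data generalizing s acc with
  | nil => simp [ptScan]
  | cons bit rest ih =>
    simp only [List.foldl_cons]
    by_cases h : bit = 0
    · simp only [h, beq_self_eq_true, if_true]
      rw [ih]; simp [ptScan, List.append_assoc]
    · have hb : (bit == 0) = false := by simp [h]
      simp only [hb]
      rw [ih]; simp [ptScan, h, List.append_assoc]

-- B's closed form, generalized over the carried sign s (even prefix parity ↦ -s).
theorem ptScan_eq_map (data : List Int) (s : Int) :
    ptScan s data
    = (List.range data.length).map (fun i =>
        if data.getD i 0 ≠ 0 then 0
        else if (data.take i).count 0 % 2 = 0 then -s else s) := by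
  induction data generalizing s with
  | nil => simp [ptScan]
  | cons b rest ih =>
    rw [List.length_cons, List.range_succ_eq_map]
    by_cases h : b = 0
    · simp only [ptScan, if_pos h, List.map_cons, List.map_map]
      rw [ih (s * -1)]
      congr 1
      · simp [h]
      · apply List.map_congr_left
        intro i _
        simp only [Function.comp_apply, List.getD_cons_succ, List.take_succ_cons, h,
          List.count_cons_self]
        by_cases hc : (rest.take i).count 0 % 2 = 0
        · have : ((rest.take i).count 0 + 1) % 2 = 1 := by omega
          simp [hc, this]
        · have : ((rest.take i).count 0 + 1) % 2 = 0 := by omega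
          simp [hc, this]
    · simp only [ptScan, if_neg h, List.map_cons, List.map_map]
      rw [ih s]
      congr 1
      · simp [h]
      · apply List.map_congr_left
        intro i _
        simp [h]

-- ===== VERDICT (by name: the statement is the Claim_ definition above) =====
theorem pseudoternary_spec : Claim_equal_pseudoternary := by
  intro data _
  show pseudoternary data = pseudoternary_alt data
  unfold pseudoternary pseudoternary_alt
  rw [ptScan_foldl, ptScan_eq_map]
  norm_num
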